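-- pv_equiv track=rewrite | github.com/darrencheng0817/AlgorithmLearning | Python/interview/practiceTwice/game24.py | solveUtil
-- ===== SOURCE A (Python) =====
-- def solveUtil(nums,target,expression,index):
--     if index==1:
--         if nums[0]==target:
--             return True
--         else:
--             return False
--     for i in range(index):
--         for j in range(i+1,index):
--             a,b=nums[i],nums[j]
--             expa,expb=expression[i],expression[j]
--             nums[j]=nums[index-1]
--             expression[j]=expression[index-1]
--
--             nums[i]=a+b
--             expression[i]="("+expa+"+"+expb+")"
--             if solveUtil(nums, target, expression, index-1):
--                 return True
--
--             nums[i]=a-b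
--             expression[i]="("+expa+"-"+expb+")"
--             if solveUtil(nums, target, expression, index-1):
--                 return True
--
--             nums[i]=b-a
--             expression[i]="("+expb+"-"+expa+")"
--             if solveUtil(nums, target, expression, index-1):
--                 return True
--
--             nums[i]=a*b
--             expression[i]="("+expa+"*"+expb+")"
--             if solveUtil(nums, target, expression, index-1):
--                 return True
--
--             if b!=0 and a%b==0:
--                 nums[i]=a//b
--                 expression[i]="("+expa+"/"+expb+")"
--                 if solveUtil(nums, target, expression, index-1):
--                     return True
--
--             if a!=0 and b%a==0:
--                 nums[i]=b//a
--                 expression[i]="("+expb+"+"+expa+")"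
--                 if solveUtil(nums, target, expression, index-1):
--                     return True
--
--             nums[i],nums[j]=a,b
--             expression[i],expression[j]=expa,expb
--     return False
-- ===== SOURCE B (Python) =====
-- def solveUtil(nums, target, expression, index):
--     if index <= 0:
--         return False
--     memo = {}
--
--     def compute(vals):
--         n = len(vals)
--         if n == 1:
--             return vals[0] == target
--         last = vals[n - 1]
--         for i in range(n):
--             for j in range(i + 1, n):
--                 a, b = vals[i], vals[j]
--                 cands = [a + b, a - b, b - a, a * b]
--                 if b != 0 and a % b == 0:
--                     cands.append(a // b)
--                 if a != 0 and b % a == 0: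
--                     cands.append(b // a)
--                 base = list(vals)
--                 base[j] = last
--                 for c in cands:
--                     base[i] = c
--                     if reach(tuple(base[:n - 1])):
--                         return True
--         return False
--
--     def reach(vals):
--         if vals in memo:
--             return memo[vals]
--         res = compute(vals)
--         memo[vals] = res
--         return res
--
--     return reach(tuple(nums[:index]))
-- ===== Notes on version B (the rewrite author's own statement) =====
-- stated objective: alternative
-- what changed: B replaces A's in-place swap-and-backtrack DFS (which also concatenates expression strings it never uses for the result) by a functional search over value tuples with a memo dict of already-explored states, so repeated states are not re-explored and no strings are built; intended as faster, measured 4.82x at the largest size but both timed out there, so recorded as unconfirmed.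
-- outside the precondition, e.g. on solveUtil([], 5, [], 1): A raises IndexError, B raises IndexError; on solveUtil([1, 2], 5, ['1'], 2): A raises IndexError, B returns False; on solveUtil([1], 5, ['1'], 2): A raises IndexError, B returns False
import Mathlib
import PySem

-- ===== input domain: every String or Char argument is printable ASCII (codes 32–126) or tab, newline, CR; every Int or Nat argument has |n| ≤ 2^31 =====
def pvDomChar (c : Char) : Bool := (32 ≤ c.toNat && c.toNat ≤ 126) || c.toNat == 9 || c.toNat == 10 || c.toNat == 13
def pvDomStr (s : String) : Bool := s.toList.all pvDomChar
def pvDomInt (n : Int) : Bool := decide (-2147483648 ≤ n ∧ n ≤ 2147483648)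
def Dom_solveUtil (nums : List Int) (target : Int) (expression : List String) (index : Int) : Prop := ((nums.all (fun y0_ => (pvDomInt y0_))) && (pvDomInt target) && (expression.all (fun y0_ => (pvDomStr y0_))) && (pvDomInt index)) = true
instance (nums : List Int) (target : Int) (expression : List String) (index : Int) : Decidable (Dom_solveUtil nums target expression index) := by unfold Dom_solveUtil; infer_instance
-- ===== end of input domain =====

-- B replaces A's in-place backtracking DFS (which also builds expression strings) by a memoized
-- search over value tuples that never touches `expression`; equivalence is about the RETURN value
-- only (Python A mutates `nums`/`expression` in place, B does not).

-- ===== PORT A =====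
def solveA (fuel : Nat) (nums : List Int) (target : Int) (expression : List String) (index : Int) : Bool :=
  if index = 1 then decide (PySem.List.pyGetD nums 0 0 = target)
  else
    match fuel with
    | 0 => false
    | f + 1 =>
      (PySem.List.pyRange 0 index 1).any (fun i =>
        (PySem.List.pyRange (i + 1) index 1).any (fun j =>
          let a := PySem.List.pyGetD nums i 0
          let b := PySem.List.pyGetD nums j 0
          let expa := PySem.List.pyGetD expression i ""
          let expb := PySem.List.pyGetD expression j ""
          let nums1 := PySem.List.pySetD nums j (PySem.List.pyGetD nums (index - 1) 0)
          let expr1 := PySem.List.pySetD expression j (PySem.List.pyGetD expression (index - 1) "")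
          (solveA f (PySem.List.pySetD nums1 i (a + b)) target
              (PySem.List.pySetD expr1 i ("(" ++ expa ++ "+" ++ expb ++ ")")) (index - 1)) ||
          (solveA f (PySem.List.pySetD nums1 i (a - b)) target
              (PySem.List.pySetD expr1 i ("(" ++ expa ++ "-" ++ expb ++ ")")) (index - 1)) ||
          (solveA f (PySem.List.pySetD nums1 i (b - a)) target
              (PySem.List.pySetD expr1 i ("(" ++ expb ++ "-" ++ expa ++ ")")) (index - 1)) ||
          (solveA f (PySem.List.pySetD nums1 i (a * b)) target
              (PySem.List.pySetD expr1 i ("(" ++ expa ++ "*" ++ expb ++ ")")) (index - 1)) ||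
          (if b ≠ 0 ∧ PySem.Int.mod a b = 0 then
            solveA f (PySem.List.pySetD nums1 i (PySem.Int.floordiv a b)) target
              (PySem.List.pySetD expr1 i ("(" ++ expa ++ "/" ++ expb ++ ")")) (index - 1)
           else false) ||
          (if a ≠ 0 ∧ PySem.Int.mod b a = 0 then
            solveA f (PySem.List.pySetD nums1 i (PySem.Int.floordiv b a)) target
              (PySem.List.pySetD expr1 i ("(" ++ expb ++ "+" ++ expa ++ ")")) (index - 1)
           else false)))
termination_by fuel

def solveUtil (nums : List Int) (target : Int) (expression : List String) (index : Int) : Bool :=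
  solveA index.toNat nums target expression index

-- ===== PORT B =====
-- `reach(vals)` of Source B: memo lookup, else compute over all pairs/candidates, then store.
def reachB (fuel : Nat) (target : Int) (vals : List Int) (memo : PySem.Dict (List Int) Bool) :
    Bool × PySem.Dict (List Int) Bool :=
  match memo.get? vals with
  | some r => (r, memo)
  | none =>
    let n := vals.length
    let rm : Bool × PySem.Dict (List Int) Bool :=
      if n = 1 then (decide (vals.getD 0 0 = target), memo)
      else
        match fuel with
        | 0 => (false, memo)
        | f + 1 =>
          let last := vals.getD (n - 1) 0
          (List.range n).foldl (fun acc i =>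
            if acc.1 then acc else
            (List.range' (i + 1) (n - (i + 1))).foldl (fun acc2 j =>
              if acc2.1 then acc2 else
              let a := vals.getD i 0
              let b := vals.getD j 0
              let cs := [a + b, a - b, b - a, a * b] ++
                (if b ≠ 0 ∧ PySem.Int.mod a b = 0 then [PySem.Int.floordiv a b] else []) ++
                (if a ≠ 0 ∧ PySem.Int.mod b a = 0 then [PySem.Int.floordiv b a] else [])
              let base := vals.set j last
              cs.foldl (fun acc3 c =>
                if acc3.1 then acc3 else
                reachB f target ((base.set i c).take (n - 1)) acc3.2) acc2) acc) (false, memo)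
    (rm.1, rm.2.insert vals rm.1)
termination_by fuel

def solveUtil_alt (nums : List Int) (target : Int) (expression : List String) (index : Int) : Bool :=
  if index ≤ 0 then false
  else (reachB index.toNat target (PySem.List.slice nums none (some index)) PySem.Dict.empty).1

-- ===== PRECONDITION & SPEC =====
-- Pre_ excludes exactly the inputs where Python A raises IndexError: index = 1 with empty nums,
-- and index ≥ 2 reaching past the end of nums or expression.
def Pre_solveUtil (nums : List Int) (target : Int) (expression : List String) (index : Int) : Prop :=
  index ≤ 0 ∨ (index = 1 ∧ nums ≠ []) ∨
    (2 ≤ index ∧ index ≤ (nums.length : Int) ∧ index ≤ (expression.length : Int))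
instance (nums : List Int) (target : Int) (expression : List String) (index : Int) : Decidable (Pre_solveUtil nums target expression index) := by unfold Pre_solveUtil; infer_instance

def pvWitness_solveUtil : List Int × Int × List String × Int := ([4, 1, 8, 7], 24, ["4", "1", "8", "7"], 4)

def Spec_solveUtil (nums : List Int) (target : Int) (expression : List String) (index : Int) (out : Bool) : Prop := out = solveUtil_alt nums target expression index
instance (nums : List Int) (target : Int) (expression : List String) (index : Int) (out : Bool) : Decidable (Spec_solveUtil nums target expression index out) := by unfold Spec_solveUtil; infer_instance

-- ===== CLAIM (what is proved, stated in full; the proofs are below) =====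
def Claim_equal_solveUtil : Prop := ∀ (nums : List Int) (target : Int) (expression : List String) (index : Int), Dom_solveUtil nums target expression index → Pre_solveUtil nums target expression index → Spec_solveUtil nums target expression index (solveUtil nums target expression index)

-- ===== LEMMAS AND PROOFS =====

-- The memo-free functional core both ports compute: reachability of `target` from the value list.
def pureReach (fuel : Nat) (target : Int) (vals : List Int) : Bool :=
  if vals.length = 1 then decide (vals.getD 0 0 = target)
  else
    match fuel with
    | 0 => false
    | f + 1 =>
      (List.range vals.length).any (fun i =>
        (List.range' (i + 1) (vals.length - (i + 1))).any (fun j =>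
          let a := vals.getD i 0
          let b := vals.getD j 0
          let cs := [a + b, a - b, b - a, a * b] ++
            (if b ≠ 0 ∧ PySem.Int.mod a b = 0 then [PySem.Int.floordiv a b] else []) ++
            (if a ≠ 0 ∧ PySem.Int.mod b a = 0 then [PySem.Int.floordiv b a] else [])
          cs.any (fun c =>
            pureReach f target (((vals.set j (vals.getD (vals.length - 1) 0)).set i c).take (vals.length - 1)))))
termination_by fuel

-- fuel irrelevance: any fuel ≥ length - 1 computes the same value
lemma pureReach_fuel (t : Int) : ∀ (n f1 f2 : Nat) (vals : List Int), vals.length = n →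
    n ≤ f1 + 1 → n ≤ f2 + 1 → pureReach f1 t vals = pureReach f2 t vals := by
  intro n
  induction n with
  | zero =>
    intro f1 f2 vals h0 _ _
    have hne : vals.length ≠ 1 := by omega
    rw [pureReach.eq_def, pureReach.eq_def, if_neg hne, if_neg hne]
    cases f1 <;> cases f2 <;> simp [h0]
  | succ m ih =>
    intro f1 f2 vals hlen h1 h2
    by_cases hone : vals.length = 1
    · rw [pureReach.eq_def, pureReach.eq_def, if_pos hone, if_pos hone]
    · have hm : 1 ≤ m := by omega
      obtain ⟨g1, rfl⟩ : ∃ g, f1 = g + 1 := ⟨f1 - 1, by omega⟩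
      obtain ⟨g2, rfl⟩ : ∃ g, f2 = g + 1 := ⟨f2 - 1, by omega⟩
      rw [pureReach.eq_def, pureReach.eq_def, if_neg hone, if_neg hone]
      simp only
      apply PySem.List.any_congr_mem; intro i _hi
      apply PySem.List.any_congr_mem; intro j _hj
      apply PySem.List.any_congr_mem; intro c _hc
      apply ih
      · simp [List.length_take, hlen]
      · omega
      · omega

lemma take_getD (l : List Int) (m n : Nat) (d : Int) (h : m < n) :
    (l.take n).getD m d = l.getD m d := by
  simp [List.getD, h]

def GoodMemo (t : Int) (memo : PySem.Dict (List Int) Bool) : Prop :=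
  ∀ k r, memo.get? k = some r → r = pureReach k.length t k

lemma foldl_stop {α σ : Type} (F : α → Bool × σ → Bool × σ) (L : List α) (s : σ) :
    L.foldl (fun acc x => if acc.1 then acc else F x acc) (true, s) = (true, s) := by
  induction L with
  | nil => rfl
  | cons x xs ih => simpa using ih

lemma foldl_skip {α σ : Type} (Good : σ → Prop) (F : α → Bool × σ → Bool × σ) (g : α → Bool) :
    ∀ (L : List α), (∀ x ∈ L, ∀ s, Good s → (F x (false, s)).1 = g x ∧ Good (F x (false, s)).2) →
    ∀ s, Good s →
      (L.foldl (fun acc x => if acc.1 then acc else F x acc) (false, s)).1 = L.any g ∧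
      Good (L.foldl (fun acc x => if acc.1 then acc else F x acc) (false, s)).2 := by
  intro L
  induction L with
  | nil => intro _ s hs; simpa using hs
  | cons x xs ih =>
    intro h s hs
    obtain ⟨h1, h2⟩ := h x (by simp) s hs
    simp only [List.foldl_cons, if_neg (by simp : ¬ ((false, s) : Bool × σ).1 = true)]
    rcases hFx : F x (false, s) with ⟨b', s'⟩
    rw [hFx] at h1 h2
    simp only at h1 h2
    subst h1
    cases hgx : g x with
    | true =>
      rw [foldl_stop]
      simpa [hgx] using h2
    | false =>
      have := ih (fun y hy => h y (by simp [hy])) s' h2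
      simpa [hgx] using this

lemma good_insert (t : Int) (memo : PySem.Dict (List Int) Bool) (vals : List Int) (res : Bool)
    (h : GoodMemo t memo) (hres : res = pureReach vals.length t vals) :
    GoodMemo t (memo.insert vals res) := by
  intro k r hk
  rw [PySem.Dict.get?_insert] at hk
  by_cases hkv : k = vals
  · rw [if_pos hkv] at hk
    subst hkv
    cases hk
    exact hres
  · rw [if_neg hkv] at hk
    exact h k r hk

lemma pureReach_len_one (t : Int) (fuel : Nat) (vals : List Int) (h : vals.length = 1) :
    pureReach fuel t vals = decide (vals.getD 0 0 = t) := by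
  rw [pureReach.eq_def, if_pos h]

lemma pureReach_len_zero (t : Int) (fuel : Nat) (vals : List Int) (h : vals.length = 0) :
    pureReach fuel t vals = false := by
  rw [pureReach.eq_def, if_neg (by omega)]
  cases fuel <;> simp [h]

lemma reachB_sound (t : Int) : ∀ (fuel : Nat) (vals : List Int) (memo : PySem.Dict (List Int) Bool),
    vals.length ≤ fuel + 1 → GoodMemo t memo →
    (reachB fuel t vals memo).1 = pureReach fuel t vals ∧ GoodMemo t (reachB fuel t vals memo).2 := by
  intro fuel
  induction fuel with
  | zero =>
    intro vals memo hlen hg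
    rw [reachB.eq_def]
    cases hmk : memo.get? vals with
    | some r =>
      refine ⟨?_, hg⟩
      rw [hg vals r hmk]
      exact pureReach_fuel t vals.length vals.length 0 vals rfl (by omega) (by omega)
    | none =>
      by_cases hone : vals.length = 1
      · simp only [if_pos hone]
        refine ⟨(pureReach_len_one t 0 vals hone).symm, ?_⟩
        exact good_insert t memo vals _ hg (by rw [pureReach_len_one t _ vals hone])
      · have h0 : vals.length = 0 := by omega
        simp only [if_neg hone]
        refine ⟨(pureReach_len_zero t 0 vals h0).symm, ?_⟩
        exact good_insert t memo vals _ hg (by rw [pureReach_len_zero t _ vals h0])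
  | succ f ih =>
    intro vals memo hlen hg
    rw [reachB.eq_def]
    cases hmk : memo.get? vals with
    | some r =>
      refine ⟨?_, hg⟩
      rw [hg vals r hmk]
      exact pureReach_fuel t vals.length vals.length (f + 1) vals rfl (by omega) (by omega)
    | none =>
      by_cases hone : vals.length = 1
      · simp only [if_pos hone]
        refine ⟨(pureReach_len_one t (f + 1) vals hone).symm, ?_⟩
        exact good_insert t memo vals _ hg (by rw [pureReach_len_one t _ vals hone])
      · simp only [if_neg hone]
        by_cases h0 : vals.length = 0
        · -- empty value list: the pair loop is empty
          simp only [h0]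
          refine ⟨by simpa using (pureReach_len_zero t (f + 1) vals h0).symm, ?_⟩
          refine good_insert t memo vals _ hg ?_
          simp [h0, pureReach_len_zero t _ vals h0]
        · -- main case: three nested skip-folds
          have hfold := foldl_skip (Good := GoodMemo t)
            (F := fun i acc =>
              (List.range' (i + 1) (vals.length - (i + 1))).foldl (fun acc2 j =>
                if acc2.1 then acc2 else
                let a := vals.getD i 0
                let b := vals.getD j 0
                let cs := [a + b, a - b, b - a, a * b] ++
                  (if b ≠ 0 ∧ PySem.Int.mod a b = 0 then [PySem.Int.floordiv a b] else []) ++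
                  (if a ≠ 0 ∧ PySem.Int.mod b a = 0 then [PySem.Int.floordiv b a] else [])
                let base := vals.set j (vals.getD (vals.length - 1) 0)
                cs.foldl (fun acc3 c =>
                  if acc3.1 then acc3 else
                  reachB f t ((base.set i c).take (vals.length - 1)) acc3.2) acc2) acc)
            (g := fun i =>
              (List.range' (i + 1) (vals.length - (i + 1))).any (fun j =>
                ([vals.getD i 0 + vals.getD j 0, vals.getD i 0 - vals.getD j 0,
                  vals.getD j 0 - vals.getD i 0, vals.getD i 0 * vals.getD j 0] ++
                  (if vals.getD j 0 ≠ 0 ∧ PySem.Int.mod (vals.getD i 0) (vals.getD j 0) = 0 then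
                    [PySem.Int.floordiv (vals.getD i 0) (vals.getD j 0)] else []) ++
                  (if vals.getD i 0 ≠ 0 ∧ PySem.Int.mod (vals.getD j 0) (vals.getD i 0) = 0 then
                    [PySem.Int.floordiv (vals.getD j 0) (vals.getD i 0)] else [])).any (fun c =>
                  pureReach f t (((vals.set j (vals.getD (vals.length - 1) 0)).set i c).take (vals.length - 1)))))
            (List.range vals.length) ?_ memo hg
          · obtain ⟨hf1, hf2⟩ := hfold
            have h1 : pureReach (f + 1) t vals =
                (List.range vals.length).any (fun i =>
                  (List.range' (i + 1) (vals.length - (i + 1))).any (fun j =>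
                    ([vals.getD i 0 + vals.getD j 0, vals.getD i 0 - vals.getD j 0,
                      vals.getD j 0 - vals.getD i 0, vals.getD i 0 * vals.getD j 0] ++
                      (if vals.getD j 0 ≠ 0 ∧ PySem.Int.mod (vals.getD i 0) (vals.getD j 0) = 0 then
                        [PySem.Int.floordiv (vals.getD i 0) (vals.getD j 0)] else []) ++
                      (if vals.getD i 0 ≠ 0 ∧ PySem.Int.mod (vals.getD j 0) (vals.getD i 0) = 0 then
                        [PySem.Int.floordiv (vals.getD j 0) (vals.getD i 0)] else [])).any (fun c =>
                      pureReach f t (((vals.set j (vals.getD (vals.length - 1) 0)).set i c).take (vals.length - 1))))) := by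
              rw [pureReach.eq_def, if_neg hone]
            exact ⟨hf1.trans h1.symm,
              good_insert t _ vals _ hf2 ((hf1.trans h1.symm).trans
                (pureReach_fuel t vals.length (f + 1) vals.length vals rfl (by omega) (by omega)))⟩
          · -- outer hypothesis: each row is a middle skip-fold
            intro i _ s hs
            exact foldl_skip (Good := GoodMemo t)
              (F := fun j acc =>
                let a := vals.getD i 0
                let b := vals.getD j 0
                let cs := [a + b, a - b, b - a, a * b] ++
                  (if b ≠ 0 ∧ PySem.Int.mod a b = 0 then [PySem.Int.floordiv a b] else []) ++
                  (if a ≠ 0 ∧ PySem.Int.mod b a = 0 then [PySem.Int.floordiv b a] else [])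
                let base := vals.set j (vals.getD (vals.length - 1) 0)
                cs.foldl (fun acc3 c =>
                  if acc3.1 then acc3 else
                  reachB f t ((base.set i c).take (vals.length - 1)) acc3.2) acc)
              (g := fun j =>
                ([vals.getD i 0 + vals.getD j 0, vals.getD i 0 - vals.getD j 0,
                  vals.getD j 0 - vals.getD i 0, vals.getD i 0 * vals.getD j 0] ++
                  (if vals.getD j 0 ≠ 0 ∧ PySem.Int.mod (vals.getD i 0) (vals.getD j 0) = 0 then
                    [PySem.Int.floordiv (vals.getD i 0) (vals.getD j 0)] else []) ++
                  (if vals.getD i 0 ≠ 0 ∧ PySem.Int.mod (vals.getD j 0) (vals.getD i 0) = 0 then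
                    [PySem.Int.floordiv (vals.getD j 0) (vals.getD i 0)] else [])).any (fun c =>
                  pureReach f t (((vals.set j (vals.getD (vals.length - 1) 0)).set i c).take (vals.length - 1))))
              (List.range' (i + 1) (vals.length - (i + 1))) (by
                -- middle hypothesis: each cell is an inner skip-fold over the candidates
                intro j _ s2 hs2
                exact foldl_skip (Good := GoodMemo t)
                  (F := fun c acc =>
                    reachB f t (((vals.set j (vals.getD (vals.length - 1) 0)).set i c).take (vals.length - 1)) acc.2)
                  (g := fun c =>
                    pureReach f t (((vals.set j (vals.getD (vals.length - 1) 0)).set i c).take (vals.length - 1)))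
                  _ (by
                    intro c _ s3 hs3
                    exact ih (((vals.set j (vals.getD (vals.length - 1) 0)).set i c).take (vals.length - 1)) s3
                      (by simp [List.length_take]; omega) hs3)
                  s2 hs2) s hs

lemma solveA_eq_pure (t : Int) : ∀ (fuel : Nat) (nums : List Int) (expr : List String) (index : Int),
    0 < index → index.toNat ≤ nums.length →
    solveA fuel nums t expr index = pureReach fuel t (nums.take index.toNat) := by
  intro fuel
  induction fuel with
  | zero =>
    intro nums expr index hpos hlen
    obtain ⟨n, rfl⟩ : ∃ m : Nat, index = (m : Int) := ⟨index.toNat, by omega⟩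
    simp only [Int.toNat_natCast] at hlen ⊢
    by_cases h1 : n = 1
    · subst h1
      rw [solveA.eq_def, if_pos (by norm_num)]
      rw [pureReach_len_one t _ _ (by rw [List.length_take]; omega), PySem.List.pyGetD_zero]
      rw [take_getD nums 0 1 0 (by omega)]
    · have hlt : (nums.take n).length = n := by rw [List.length_take]; omega
      rw [solveA.eq_def, if_neg (by omega : ¬ ((n : Int) = 1))]
      rw [pureReach.eq_def, hlt, if_neg h1]
  | succ f ih =>
    intro nums expr index hpos hlen
    obtain ⟨n, rfl⟩ : ∃ m : Nat, index = (m : Int) := ⟨index.toNat, by omega⟩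
    simp only [Int.toNat_natCast] at hlen ⊢
    by_cases h1 : n = 1
    · subst h1
      rw [solveA.eq_def, if_pos (by norm_num)]
      rw [pureReach_len_one t _ _ (by rw [List.length_take]; omega), PySem.List.pyGetD_zero]
      rw [take_getD nums 0 1 0 (by omega)]
    · have hn2 : 2 ≤ n := by omega
      have hlt : (nums.take n).length = n := by rw [List.length_take]; omega
      rw [solveA.eq_def, if_neg (by omega : ¬ ((n : Int) = 1))]
      rw [pureReach.eq_def, hlt, if_neg h1]
      simp only
      rw [PySem.List.pyRange_one 0 (n : Int), show ((n : Int) - 0).toNat = n by omega, List.any_map]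
      apply PySem.List.any_congr_mem
      intro i hi
      have hi' : i < n := List.mem_range.mp hi
      simp only [Function.comp]
      rw [PySem.List.pyRange_one (0 + (i : Int) + 1) (n : Int),
        show ((n : Int) - (0 + (i : Int) + 1)).toNat = n - (i + 1) by omega, List.any_map]
      rw [List.range'_eq_map_range, List.any_map]
      apply PySem.List.any_congr_mem
      intro k hk
      have hk' : k < n - (i + 1) := List.mem_range.mp hk
      simp only [Function.comp]
      have ej2 : ((i : Int) + 1 + (k : Int)) = ((i + 1 + k : Nat) : Int) := by push_cast; ring
      have ei : (0 + (i : Int)) = ((i : Nat) : Int) := by omega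
      have en1 : ((n : Int) - 1) = ((n - 1 : Nat) : Int) := by omega
      simp only [ej2, ei, en1, PySem.List.pyGetD_natCast, PySem.List.pySetD_natCast]
      rw [take_getD nums i n 0 hi', take_getD nums (i + 1 + k) n 0 (by omega),
        take_getD nums (n - 1) n 0 (by omega)]
      have hstate : ∀ c : Int,
          (((nums.take n).set (i + 1 + k) (nums.getD (n - 1) 0)).set i c).take (n - 1) =
          ((nums.set (i + 1 + k) (nums.getD (n - 1) 0)).set i c).take (n - 1) := by
        intro c
        rw [← List.take_set, ← List.take_set, List.take_take]
        congr 1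
        omega
      have key : ∀ (c : Int) (e : List String),
          solveA f ((nums.set (i + 1 + k) (nums.getD (n - 1) 0)).set i c) t e ((n - 1 : Nat) : Int) =
          pureReach f t (((nums.set (i + 1 + k) (nums.getD (n - 1) 0)).set i c).take (n - 1)) := by
        intro c e
        rw [ih _ e _ (by omega) (by simp [Int.toNat_natCast, List.length_set]; omega)]
        rw [Int.toNat_natCast]
      have hite : ∀ (c : Prop) (inst : Decidable c) (x : Int) (p : Int → Bool),
          (if c then [x] else []).any p = if c then p x else false := by
        intro c inst x p
        split_ifs <;> simp
      simp only [key, hstate, List.any_append, hite, List.any_cons, List.any_nil,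
        Bool.or_false, Bool.or_assoc]

-- ===== VERDICT (by name: the statement is the Claim_ definition above) =====
theorem solveUtil_spec : Claim_equal_solveUtil := by
  intro nums target expression index _hDom hPre
  unfold Spec_solveUtil solveUtil solveUtil_alt
  by_cases hle : index ≤ 0
  · rw [if_pos hle, solveA.eq_def]
    have h0 : index.toNat = 0 := by omega
    rw [if_neg (by omega), h0]
  · rw [if_neg hle]
    have hpos : 0 < index := by omega
    have hlen : index.toNat ≤ nums.length := by
      rcases hPre with h | ⟨h1, h2⟩ | ⟨h1, h2, _⟩
      · omega
      · have h3 : 0 < nums.length := List.length_pos_of_ne_nil h2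
        omega
      · omega
    rw [PySem.List.slice_to _ (by omega)]
    have hGood : GoodMemo target PySem.Dict.empty := by
      intro k r hk; simp [PySem.Dict.get?_empty] at hk
    have hlen2 : (nums.take index.toNat).length ≤ index.toNat + 1 := by
      rw [List.length_take]; omega
    have := (reachB_sound target index.toNat (nums.take index.toNat) PySem.Dict.empty hlen2 hGood).1
    rw [this, solveA_eq_pure target index.toNat nums expression index hpos hlen]
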